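-- pv_equiv track=rewrite | github.com/BghBenja/CodeWars | Python/kyu6kata/count_the_smiley_faces.py | mine_count_smileys
-- ===== SOURCE A (Python) =====
-- def mine_count_smileys(arr):
--     eye = [":", ";"]
--     nose = ["-", "~"]
--     face = [")", "D"]
--     count = 0
--     for i in arr:
--         if len(i) == 2:
--             if i[0] in eye and i[1] in face:
--                 count += 1
--         elif len(i) == 3:
--             if i[0] in eye and i[1] in nose and i[2] in face:
--                 count += 1
--     return count
-- ===== SOURCE B (Python) =====
-- def mine_count_smileys(arr):
--     valid = {e + n + f for e in ":;" for n in ("", "-", "~") for f in ")D"}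
--     return sum(s in valid for s in arr)
-- ===== Notes on version B (the rewrite author's own statement) =====
-- stated objective: idiomatic
-- what changed: B precomputes the set of all 12 valid smiley strings (eyes x optional nose x mouth) once and counts array elements by set membership, instead of per-element length branching with index-based character tests.
import Mathlib
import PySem

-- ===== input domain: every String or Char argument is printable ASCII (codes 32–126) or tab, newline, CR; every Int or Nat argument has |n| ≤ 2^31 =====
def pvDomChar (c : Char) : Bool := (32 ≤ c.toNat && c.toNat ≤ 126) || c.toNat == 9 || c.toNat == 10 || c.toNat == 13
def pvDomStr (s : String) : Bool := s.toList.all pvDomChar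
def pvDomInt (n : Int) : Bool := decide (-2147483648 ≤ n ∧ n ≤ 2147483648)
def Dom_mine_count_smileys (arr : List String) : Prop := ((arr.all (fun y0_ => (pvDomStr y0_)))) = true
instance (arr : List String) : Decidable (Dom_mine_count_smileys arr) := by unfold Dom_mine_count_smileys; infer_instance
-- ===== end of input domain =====

-- B counts matches against a precomputed set of all 12 valid smiley strings instead of
-- per-element length branching with index-based character tests (objective: idiomatic).

-- ===== PORT A =====
def mine_count_smileys (arr : List String) : Int :=
  let eye : List Char := [':', ';']
  let nose : List Char := ['-', '~']
  let face : List Char := [')', 'D']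
  arr.foldl (fun count i =>
    if PySem.Str.len i = 2 then
      if ((PySem.Str.pyGet? i 0).any (fun c => eye.contains c))
          && ((PySem.Str.pyGet? i 1).any (fun c => face.contains c)) then count + 1 else count
    else if PySem.Str.len i = 3 then
      if ((PySem.Str.pyGet? i 0).any (fun c => eye.contains c))
          && ((PySem.Str.pyGet? i 1).any (fun c => nose.contains c))
          && ((PySem.Str.pyGet? i 2).any (fun c => face.contains c)) then count + 1 else count
    else count) 0

-- ===== PORT B =====
-- the set comprehension {e+n+f ...}: eyes x noses x mouths, built as a PySem.Set
def smileyValid : PySem.Set String :=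
  PySem.Set.ofList
    ((":;".toList).flatMap (fun e =>
      ["", "-", "~"].flatMap (fun n =>
        (")D".toList).map (fun f => String.ofList [e] ++ n ++ String.ofList [f]))))

def mine_count_smileys_alt (arr : List String) : Int :=
  -- sum(s in valid for s in arr)
  arr.foldl (fun acc s => acc + (if PySem.Set.contains smileyValid s then 1 else 0)) 0

-- ===== PRECONDITION & SPEC =====
def Spec_mine_count_smileys (arr : List String) (out : Int) : Prop := out = mine_count_smileys_alt arr
instance (arr : List String) (out : Int) : Decidable (Spec_mine_count_smileys arr out) := by unfold Spec_mine_count_smileys; infer_instance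

-- ===== CLAIM (what is proved, stated in full; the proofs are below) =====
def Claim_equal_mine_count_smileys : Prop := ∀ (arr : List String), Dom_mine_count_smileys arr → Spec_mine_count_smileys arr (mine_count_smileys arr)

-- ===== LEMMAS AND PROOFS =====

-- the 12 valid smileys, spelled as character lists
def smileyLists : List (List Char) :=
  [[':', ')'], [':', 'D'], [':', '-', ')'], [':', '-', 'D'], [':', '~', ')'], [':', '~', 'D'],
   [';', ')'], [';', 'D'], [';', '-', ')'], [';', '-', 'D'], [';', '~', ')'], [';', '~', 'D']]

theorem contains_smiley (l : List Char) :
    PySem.Set.contains smileyValid (String.ofList l) = decide (l ∈ smileyLists) := by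
  have h : smileyValid = [":)", ":D", ":-)", ":-D", ":~)", ":~D",
                         ";)", ";D", ";-)", ";-D", ";~)", ";~D"] := by decide
  rw [h]
  simp only [PySem.Set.contains, List.contains_eq_mem, smileyLists, List.mem_cons,
    show (":)" : String) = String.ofList [':', ')'] from rfl,
    show (":D" : String) = String.ofList [':', 'D'] from rfl,
    show (":-)" : String) = String.ofList [':', '-', ')'] from rfl,
    show (":-D" : String) = String.ofList [':', '-', 'D'] from rfl,
    show (":~)" : String) = String.ofList [':', '~', ')'] from rfl,
    show (":~D" : String) = String.ofList [':', '~', 'D'] from rfl,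
    show (";)" : String) = String.ofList [';', ')'] from rfl,
    show (";D" : String) = String.ofList [';', 'D'] from rfl,
    show (";-)" : String) = String.ofList [';', '-', ')'] from rfl,
    show (";-D" : String) = String.ofList [';', '-', 'D'] from rfl,
    show (";~)" : String) = String.ofList [';', '~', ')'] from rfl,
    show (";~D" : String) = String.ofList [';', '~', 'D'] from rfl,
    String.ofList_inj, List.not_mem_nil, or_false]

set_option maxHeartbeats 1000000 in
theorem step_eq (c : Int) (s : String) :
    (if PySem.Str.len s = 2 then
      if ((PySem.Str.pyGet? s 0).any (fun ch => [':', ';'].contains ch))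
          && ((PySem.Str.pyGet? s 1).any (fun ch => [')', 'D'].contains ch)) then c + 1 else c
    else if PySem.Str.len s = 3 then
      if ((PySem.Str.pyGet? s 0).any (fun ch => [':', ';'].contains ch))
          && ((PySem.Str.pyGet? s 1).any (fun ch => ['-', '~'].contains ch))
          && ((PySem.Str.pyGet? s 2).any (fun ch => [')', 'D'].contains ch)) then c + 1 else c
    else c) = c + (if PySem.Set.contains smileyValid s then 1 else 0) := by
  obtain ⟨l, rfl⟩ : ∃ l, s = String.ofList l := ⟨s.toList, by simp⟩
  rw [contains_smiley]
  match l with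
  | [] => simp [smileyLists]
  | [a] => simp [smileyLists, PySem.Str.len_eq]
  | [a, b] =>
      simp [PySem.Str.pyGet?, smileyLists, List.contains_eq_mem]
      split_ifs <;> first | omega | tauto
  | [a, b, d] =>
      simp [PySem.Str.pyGet?, smileyLists, List.contains_eq_mem]
      split_ifs <;> first | omega | tauto
  | a :: b :: d :: e :: l' =>
      simp only [PySem.Str.len_eq, String.toList_ofList, List.length_cons]
      rw [if_neg (by push_cast; omega), if_neg (by push_cast; omega)]
      simp [smileyLists]

-- ===== VERDICT (by name: the statement is the Claim_ definition above) =====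
theorem mine_count_smileys_spec : Claim_equal_mine_count_smileys := by
  intro arr _
  unfold Spec_mine_count_smileys mine_count_smileys mine_count_smileys_alt
  apply PySem.List.foldl_congr_mem
  intro c s _
  exact step_eq c s
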